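-- pv_equiv track=rewrite | github.com/RBauer32/CSE8803 | seirm_ode_data_generation.py | get_epiweek_data
-- ===== SOURCE A (Python) =====
-- def get_epiweek_data(max_time):
--     epiweeks = []
--     year = 2020
--     epiweek_num = 10
--
--     for i in range(max_time):
--         if epiweek_num >= 52:
--             epiweek_num = 0
--             year += 1
--         epiweeks.append(str(year) + str(int(epiweek_num + i // 7)))
--     return epiweeks
-- ===== SOURCE B (Python) =====
-- def get_epiweek_data(max_time):
--     # Block-fill over epiweeks: each week label covers up to 7 time steps.
--     labels = []
--     week = 10
--     remaining = max_time
--     while remaining > 0: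
--         block = min(7, remaining)
--         labels.extend(["2020" + str(week)] * block)
--         remaining -= block
--         week += 1
--     return labels
-- ===== Notes on version B (the rewrite author's own statement) =====
-- stated objective: alternative
-- what changed: B loops over epiweeks and fills a block of up to seven identical labels per week with a remaining counter, instead of A's per-time-step loop computing i//7 (and carrying dead year/week-rollover state) for each index.
import Mathlib
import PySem

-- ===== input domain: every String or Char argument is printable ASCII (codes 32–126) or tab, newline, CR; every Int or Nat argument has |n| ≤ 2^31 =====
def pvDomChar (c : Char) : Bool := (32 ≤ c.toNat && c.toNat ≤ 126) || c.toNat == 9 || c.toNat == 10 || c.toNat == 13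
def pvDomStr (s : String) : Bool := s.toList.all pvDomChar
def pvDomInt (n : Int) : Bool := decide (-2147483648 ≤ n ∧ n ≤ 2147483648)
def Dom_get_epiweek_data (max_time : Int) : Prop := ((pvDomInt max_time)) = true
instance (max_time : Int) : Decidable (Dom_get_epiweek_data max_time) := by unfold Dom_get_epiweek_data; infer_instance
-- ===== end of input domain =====

-- B builds the same labels by an outer loop over epiweeks, filling a block of up to 7
-- identical labels per week (alternative decomposition; same cost).

-- ===== PORT A =====
-- loop body of A: state = (epiweeks, year, epiweek_num)
def pvStepA (st : List String × Int × Int) (i : Int) : List String × Int × Int :=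
  let epiweeks := st.1
  let year := st.2.1
  let epiweek_num := st.2.2
  let (year, epiweek_num) :=
    if epiweek_num ≥ 52 then (year + 1, (0 : Int)) else (year, epiweek_num)
  (epiweeks ++ [PySem.Int.toStr year ++ PySem.Int.toStr (epiweek_num + PySem.Int.floordiv i 7)],
   year, epiweek_num)

def get_epiweek_data (max_time : Int) : List String :=
  ((PySem.List.pyRange 0 max_time 1).foldl pvStepA ([], 2020, 10)).1

-- ===== PORT B =====
-- the while-loop of Source B: state = (week, remaining, labels)
def pvAltGo (week : Int) (remaining : Int) (labels : List String) : List String :=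
  if remaining > 0 then
    let block := min 7 remaining
    pvAltGo (week + 1) (remaining - block)
      (labels ++ List.replicate block.toNat ("2020" ++ PySem.Int.toStr week))
  else labels
termination_by remaining.toNat
decreasing_by omega

def get_epiweek_data_alt (max_time : Int) : List String :=
  pvAltGo 10 max_time []

-- ===== PRECONDITION & SPEC =====
def Spec_get_epiweek_data (max_time : Int) (out : List String) : Prop := out = get_epiweek_data_alt max_time
instance (max_time : Int) (out : List String) : Decidable (Spec_get_epiweek_data max_time out) := by unfold Spec_get_epiweek_data; infer_instance

-- ===== CLAIM (what is proved, stated in full; the proofs are below) =====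
def Claim_equal_get_epiweek_data : Prop := ∀ (max_time : Int), Dom_get_epiweek_data max_time → Spec_get_epiweek_data max_time (get_epiweek_data max_time)

-- ===== LEMMAS AND PROOFS =====

-- common closed form: label k = "2020" ++ str(10 + k // 7)
def pvLbl (week : Int) (k : Nat) : String :=
  "2020" ++ PySem.Int.toStr (week + PySem.Int.floordiv (k : Int) 7)

-- A's loop never fires the (epiweek_num ≥ 52) branch: the state stays (2020, 10).
theorem pvStepA_eq (acc : List String) (i : Int) :
    pvStepA (acc, 2020, 10) i =
      (acc ++ [PySem.Int.toStr 2020 ++ PySem.Int.toStr (10 + PySem.Int.floordiv i 7)], 2020, 10) := by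
  simp [pvStepA]

theorem pvA_foldl (l : List Int) (acc : List String) :
    l.foldl pvStepA (acc, 2020, 10) =
      (acc ++ l.map (fun i => PySem.Int.toStr 2020 ++ PySem.Int.toStr (10 + PySem.Int.floordiv i 7)),
       2020, 10) := by
  induction l generalizing acc with
  | nil => simp
  | cons i t ih =>
      rw [List.foldl_cons, pvStepA_eq, ih]
      simp

theorem pvA_eq (max_time : Int) :
    get_epiweek_data max_time = (List.range max_time.toNat).map (pvLbl 10) := by
  unfold get_epiweek_data
  rw [PySem.List.pyRange_one, pvA_foldl]
  simp only [List.nil_append, List.map_map, Int.sub_zero]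
  apply List.map_congr_left
  intro k _
  simp only [Function.comp, pvLbl]
  norm_num
  rfl

-- B's block-fill produces the same closed form, shifted by the current week.
theorem pvB_eq (week r : Int) (labels : List String) :
    pvAltGo week r labels = labels ++ (List.range r.toNat).map (pvLbl week) := by
  fun_induction pvAltGo week r labels with
  | case1 week r labels h block ih =>
      rw [ih]
      have hb : block = min 7 r := rfl
      have hsplit : r.toNat = block.toNat + (r - block).toNat := by omega
      rw [List.append_assoc]
      congr 1
      rw [hsplit, List.range_add, List.map_append, List.map_map]
      congr 1
      · -- first block: k < min 7 r ≤ 7, so k // 7 = 0 and the label is constant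
        symm
        apply List.eq_replicate_iff.mpr
        refine ⟨by simp, ?_⟩
        intro s hs
        simp only [List.mem_map, List.mem_range] at hs
        obtain ⟨k, hk, rfl⟩ := hs
        have h7 : (k : Int) / 7 = 0 := by omega
        simp [pvLbl, h7]
      · -- rest: only nonempty when min 7 r = 7; then (7 + k) // 7 = 1 + k // 7
        rcases (by omega : r ≤ 7 ∨ 7 < r) with hr | hr
        · have : (r - block).toNat = 0 := by omega
          simp [this]
        · have hm : block = 7 := by omega
          symm
          apply List.map_congr_left
          intro k hk
          simp only [Function.comp]
          have hcast : ((block.toNat + k : Nat) : Int) = 7 + (k : Int) := by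
            push_cast; omega
          unfold pvLbl
          rw [hcast]
          rw [PySem.Int.floordiv_eq_ediv_of_pos (show (0:Int) < 7 by omega),
              PySem.Int.floordiv_eq_ediv_of_pos (show (0:Int) < 7 by omega)]
          congr 2
          omega
  | case2 week r labels h =>
      have : r.toNat = 0 := by omega
      simp [this]

-- ===== VERDICT (by name: the statement is the Claim_ definition above) =====
theorem get_epiweek_data_spec : Claim_equal_get_epiweek_data := by
  intro max_time _
  unfold Spec_get_epiweek_data get_epiweek_data_alt
  rw [pvA_eq, pvB_eq]
  simp
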